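-- pv_equiv track=rewrite | github.com/Strawberry-Software-Industries/strawberry-ide | b1.0/main.py | delete_last_after_slash
-- ===== SOURCE A (Python) =====
-- def delete_last_after_slash(input:str):
--     input=input.split("/")
--     input.pop(len(input)-1)
--     raw_output=input
--     output=""
--     for a in raw_output:
--         output=output+a+"/"
--     return output
-- ===== SOURCE B (Python) =====
-- def delete_last_after_slash(input: str):
--     return input[:input.rfind("/") + 1]
-- ===== Notes on version B (the rewrite author's own statement) =====
-- stated objective: idiomatic
-- what changed: B slices the string up to and including the position of the last slash found by rfind, replacing A's split-into-segments, pop, and rebuild-by-concatenation loop.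
import Mathlib
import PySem

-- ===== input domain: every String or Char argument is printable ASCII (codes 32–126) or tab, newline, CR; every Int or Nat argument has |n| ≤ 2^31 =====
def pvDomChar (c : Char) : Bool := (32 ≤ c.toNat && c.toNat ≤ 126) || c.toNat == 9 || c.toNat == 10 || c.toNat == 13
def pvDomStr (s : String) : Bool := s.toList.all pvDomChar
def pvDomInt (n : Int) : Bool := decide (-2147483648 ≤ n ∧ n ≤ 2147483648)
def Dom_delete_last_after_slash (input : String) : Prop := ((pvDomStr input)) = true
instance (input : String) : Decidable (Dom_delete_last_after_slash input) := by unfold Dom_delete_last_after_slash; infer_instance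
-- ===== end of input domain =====

-- B replaces A's split / pop-the-last-segment / rebuild-by-concatenation loop with a single
-- rfind-and-slice up to and including the last slash. Objective: idiomatic.

-- ===== PORT A =====
def delete_last_after_slash (input : String) : String :=
  let parts := PySem.Chars.splitOn input.toList ['/']
  match PySem.List.pop? parts ((parts.length : Int) - 1) with
  | none => ""  -- unreachable: split("/") always returns a non-empty list
  | some (_, raw_output) =>
      String.ofList (raw_output.foldl (fun output a => output ++ a ++ ['/']) [])

-- ===== PORT B =====
def delete_last_after_slash_alt (input : String) : String :=
  PySem.Str.slice input none (some (PySem.Str.rfind input "/" + 1))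

-- ===== PRECONDITION & SPEC =====
def Spec_delete_last_after_slash (input : String) (out : String) : Prop := out = delete_last_after_slash_alt input
instance (input : String) (out : String) : Decidable (Spec_delete_last_after_slash input out) := by unfold Spec_delete_last_after_slash; infer_instance

-- ===== CLAIM (what is proved, stated in full; the proofs are below) =====
def Claim_equal_delete_last_after_slash : Prop := ∀ (input : String), Dom_delete_last_after_slash input → Spec_delete_last_after_slash input (delete_last_after_slash input)

-- ===== LEMMAS AND PROOFS =====

-- proof-side structural model of str.split('/')
def mySplit : List Char → List (List Char)
  | [] => [[]]
  | c :: rest => if c = '/' then [] :: mySplit rest else (mySplit rest).modifyHead (c :: ·)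

lemma length_mySplit (cs : List Char) : (mySplit cs).length = cs.count '/' + 1 := by
  induction cs with
  | nil => rfl
  | cons c rest ih =>
      simp only [mySplit]
      split_ifs with hc
      · subst hc; simp [ih]
      · simp [List.length_modifyHead, ih, hc]

lemma mySplit_ne_nil (cs : List Char) : mySplit cs ≠ [] := by
  intro h
  have := length_mySplit cs
  rw [h] at this
  simp at this

lemma mySplit_no_slash (cs : List Char) (h : '/' ∉ cs) : mySplit cs = [cs] := by
  induction cs with
  | nil => rfl
  | cons c rest ih =>
      simp only [List.mem_cons, not_or] at h
      simp [mySplit, Ne.symm h.1, ih h.2]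

lemma splitOn_go_spec (l : List Char) : ∀ (fuel : Nat) (cur : List Char) (acc : List (List Char)),
    l.length ≤ fuel →
    PySem.Chars.splitOn.go ['/'] fuel l cur acc
      = acc.reverse ++ (mySplit l).modifyHead (cur.reverse ++ ·) := by
  induction l with
  | nil =>
      intro fuel cur acc _
      cases fuel <;> simp [PySem.Chars.splitOn.go, mySplit]
  | cons c rest ih =>
      intro fuel cur acc hfuel
      cases fuel with
      | zero => simp at hfuel
      | succ f =>
          simp only [PySem.Chars.splitOn.go]
          by_cases hc : c = '/'
          · subst hc
            have hpre : ['/'].isPrefixOf ('/' :: rest) = true := by simp [List.isPrefixOf]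
            rw [if_pos hpre]
            simp only [List.length_cons] at hfuel
            simp only [List.length_singleton, List.drop_succ_cons, List.drop_zero]
            rw [ih f [] ((List.reverse cur) :: acc) (by omega)]
            cases hms : mySplit rest <;> simp [mySplit, hms]
          · have hpre : ['/'].isPrefixOf (c :: rest) = false := by
              simp [List.isPrefixOf]; exact fun h => hc h.symm
            rw [if_neg (by simp [hpre])]
            simp only [List.length_cons] at hfuel
            rw [ih f (c :: cur) acc (by omega)]
            simp only [mySplit, if_neg hc, List.modifyHead_modifyHead]
            congr 1
            cases h : mySplit rest with
            | nil => rfl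
            | cons a t => simp

lemma splitOn_eq_mySplit (cs : List Char) : PySem.Chars.splitOn cs ['/'] = mySplit cs := by
  have := splitOn_go_spec cs (cs.length + 1) [] [] (by omega)
  rw [show PySem.Chars.splitOn cs ['/'] = PySem.Chars.splitOn.go ['/'] (cs.length + 1) cs [] [] from rfl, this]
  cases mySplit cs <;> simp

-- rfind('/') recurrence
lemma rfind_go_shift (c : Char) (cs : List Char) : ∀ j : Nat,
    PySem.Chars.rfind.go (c :: cs) ['/'] (j + 1)
      = if PySem.Chars.rfind.go cs ['/'] j = -1 then (if c = '/' then (0 : Int) else -1)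
        else PySem.Chars.rfind.go cs ['/'] j + 1 := by
  intro j
  induction j with
  | zero =>
      simp only [PySem.Chars.rfind.go, List.drop_succ_cons, List.drop_zero]
      by_cases h : ['/'].isPrefixOf cs = true
      · simp [h]
      · by_cases hc : c = '/'
        · subst hc; simp [h, List.isPrefixOf]
        · have hc' : ¬('/' = c) := fun hh => hc hh.symm
          simp [h, hc, hc', List.isPrefixOf]
  | succ j ih =>
      have hL : PySem.Chars.rfind.go (c :: cs) ['/'] (j + 1 + 1)
          = if ['/'].isPrefixOf (List.drop (j + 1 + 1) (c :: cs)) = true then ((j : Int) + 2)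
            else PySem.Chars.rfind.go (c :: cs) ['/'] (j + 1) := by
        simp only [PySem.Chars.rfind.go]
        split_ifs <;> rfl
      have hR : PySem.Chars.rfind.go cs ['/'] (j + 1)
          = if ['/'].isPrefixOf (List.drop (j + 1) cs) = true then ((j : Int) + 1)
            else PySem.Chars.rfind.go cs ['/'] j := by
        simp only [PySem.Chars.rfind.go]
        split_ifs <;> rfl
      rw [hL, hR, List.drop_succ_cons]
      by_cases h : ['/'].isPrefixOf (List.drop (j + 1) cs) = true
      · rw [if_pos h, if_pos h, if_neg (by omega)]
        ring
      · rw [if_neg h, if_neg h, ih]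

lemma rfind_cons (c : Char) (cs : List Char) :
    PySem.Chars.rfind (c :: cs) ['/']
      = if PySem.Chars.rfind cs ['/'] = -1 then (if c = '/' then (0 : Int) else -1)
        else PySem.Chars.rfind cs ['/'] + 1 := by
  simp only [PySem.Chars.rfind, List.length_cons]
  exact rfind_go_shift c cs cs.length

lemma rfind_nil : PySem.Chars.rfind [] ['/'] = -1 := by decide

lemma neg_one_le_rfind (cs : List Char) : -1 ≤ PySem.Chars.rfind cs ['/'] := by
  induction cs with
  | nil => rw [rfind_nil]
  | cons c rest ih =>
      rw [rfind_cons]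
      split_ifs <;> omega

lemma rfind_eq_neg_one_iff (cs : List Char) :
    PySem.Chars.rfind cs ['/'] = -1 ↔ '/' ∉ cs := by
  induction cs with
  | nil => simp [rfind_nil]
  | cons c rest ih =>
      rw [rfind_cons]
      have h1 := neg_one_le_rfind rest
      by_cases h : PySem.Chars.rfind rest ['/'] = -1
      · rw [if_pos h]
        by_cases hc : c = '/'
        · simp [hc, ih.mp h]
        · simp [hc, ih.mp h, Ne.symm hc]
      · rw [if_neg h]
        constructor
        · intro habs; omega
        · intro hnm
          exact absurd (ih.mpr (fun hm => hnm (List.mem_cons_of_mem _ hm))) h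

-- the central fact: A's rebuilt string is the take up to (and including) the last '/'
lemma main_lemma (cs : List Char) :
    ((mySplit cs).dropLast).flatMap (fun a => a ++ ['/'])
      = cs.take (PySem.Chars.rfind cs ['/'] + 1).toNat := by
  induction cs with
  | nil => simp [mySplit, rfind_nil]
  | cons c rest ih =>
      rw [rfind_cons]
      by_cases hm : '/' ∈ rest
      · have hne : PySem.Chars.rfind rest ['/'] ≠ -1 := fun h => (rfind_eq_neg_one_iff rest).mp h hm
        have hge : 0 ≤ PySem.Chars.rfind rest ['/'] := by have := neg_one_le_rfind rest; omega
        rw [if_neg hne]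
        have htake : (PySem.Chars.rfind rest ['/'] + 1 + 1).toNat
            = (PySem.Chars.rfind rest ['/'] + 1).toNat + 1 := by omega
        rw [htake, List.take_succ_cons]
        -- mySplit rest has length ≥ 2
        have hlen : 2 ≤ (mySplit rest).length := by
          rw [length_mySplit]
          have : 0 < rest.count '/' := List.count_pos_iff.mpr hm
          omega
        obtain ⟨a, t, ht⟩ : ∃ a t, mySplit rest = a :: t := by
          cases h : mySplit rest with
          | nil => exact absurd h (mySplit_ne_nil rest)
          | cons a t => exact ⟨a, t, rfl⟩
        obtain ⟨b, u, hu⟩ : ∃ b u, t = b :: u := by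
          cases h : t with
          | nil => rw [ht, h] at hlen; simp at hlen
          | cons b u => exact ⟨b, u, rfl⟩
        by_cases hc : c = '/'
        · subst hc
          have hms : mySplit ('/' :: rest) = [] :: mySplit rest := by simp [mySplit]
          rw [hms, ht, hu, List.dropLast_cons₂, List.flatMap_cons]
          rw [ht, hu, List.dropLast_cons₂, List.flatMap_cons] at ih
          simpa using ih
        · have hms : mySplit (c :: rest) = (mySplit rest).modifyHead (c :: ·) := by
            simp [mySplit, hc]
          rw [hms, ht, hu, List.modifyHead_cons, List.dropLast_cons₂, List.flatMap_cons]
          rw [ht, hu, List.dropLast_cons₂, List.flatMap_cons] at ih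
          rw [← ih]
          simp
      · have h1 : PySem.Chars.rfind rest ['/'] = -1 := (rfind_eq_neg_one_iff rest).mpr hm
        rw [if_pos h1]
        by_cases hc : c = '/'
        · subst hc
          have hms : mySplit ('/' :: rest) = [] :: mySplit rest := by simp [mySplit]
          rw [hms, mySplit_no_slash rest hm]
          simp
        · have hms : mySplit (c :: rest) = (mySplit rest).modifyHead (c :: ·) := by
            simp [mySplit, hc]
          rw [hms, mySplit_no_slash rest hm]
          simp [hc]

lemma erase_last {α : Type} (ys : List α) (x : α) :
    (ys ++ [x]).eraseIdx ys.length = ys := by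
  induction ys with
  | nil => rfl
  | cons a l ihl => simpa using ihl

lemma pop_concat {α : Type} (ys : List α) (x : α) :
    PySem.List.pop? (ys ++ [x]) (((ys ++ [x]).length : Int) - 1) = some (x, ys) := by
  have h2 : PySem.List.pop? (ys ++ [x]) ((ys.length : Nat) : Int) = some (x, ys) := by
    rw [PySem.List.pop?_natCast (xs := ys ++ [x]) (n := ys.length) (by simp)]
    simp [erase_last]
  have h : (((ys ++ [x]).length : Int) - 1) = ((ys.length : Nat) : Int) := by simp
  rw [h, h2]

-- ===== VERDICT (by name: the statement is the Claim_ definition above) =====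
theorem delete_last_after_slash_spec : Claim_equal_delete_last_after_slash := by
  unfold Claim_equal_delete_last_after_slash
  intro input _
  unfold Spec_delete_last_after_slash delete_last_after_slash delete_last_after_slash_alt
  obtain ⟨ys, x, hyx⟩ : ∃ ys x, mySplit input.toList = ys ++ [x] := by
    rcases List.eq_nil_or_concat (mySplit input.toList) with h | ⟨ys, x, h⟩
    · exact absurd h (mySplit_ne_nil _)
    · exact ⟨ys, x, by simpa [List.concat_eq_append] using h⟩
  simp only [splitOn_eq_mySplit, hyx, pop_concat]
  have hfold : ys.foldl (fun output a => output ++ a ++ ['/']) []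
      = ys.flatMap (fun a => a ++ ['/']) := by
    have := PySem.List.foldl_append_eq_flatMap (fun a => a ++ ['/']) ys ([] : List Char)
    simpa [List.append_assoc] using this
  have hys : ys = (mySplit input.toList).dropLast := by rw [hyx]; simp
  have hmain := main_lemma input.toList
  rw [← hys] at hmain
  have hb : 0 ≤ PySem.Chars.rfind input.toList ['/'] + 1 := by
    have := neg_one_le_rfind input.toList; omega
  apply String.toList_injective
  simp only [hfold, hmain]
  have : ("/" : String).toList = ['/'] := rfl
  simp [PySem.Str.rfind_eq, this, PySem.List.slice_to _ hb]
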